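-- pv_equiv track=rewrite | github.com/yougurt-cui/csv_mysql_labeling_project_public | scripts/product_entity.py | filter_entities_by_text
-- ===== SOURCE A (Python) =====
-- def filter_entities_by_text(entities, original_text: str):
--     """
--     强约束：只保留原文中真实出现的实体，避免模型臆造。
--     同时保持顺序并去重（按首次出现）。
--     """
--     text = original_text or ""
--     kept = []
--     seen = set()
--     for ent in entities:
--         if ent in seen:
--             continue
--         if ent in text:
--             kept.append(ent)
--             seen.add(ent)
--     # 再按出现位置排序（防止模型顺序乱）
--     kept.sort(key=lambda e: text.find(e))
--     return kept
-- ===== SOURCE B (Python) =====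
-- def filter_entities_by_text(entities, original_text: str):
--     # Bucket (counting) sort by first-occurrence position: no comparison sort.
--     text = original_text or ""
--     buckets = [[] for _ in range(len(text) + 1)]
--     seen = set()
--     for ent in entities:
--         if ent in seen:
--             continue
--         seen.add(ent)
--         p = text.find(ent)
--         if p >= 0:
--             buckets[p].append(ent)
--     return [e for b in buckets for e in b]
-- ===== Notes on version B (the rewrite author's own statement) =====
-- stated objective: alternative
-- what changed: B replaces A's filter-then-comparison-sort with a bucket (counting) sort: each first-seen entity with text.find(e) >= 0 is appended to buckets[find(e)] in one pass and the buckets are concatenated, so no sort call and no comparisons occur; correct because concatenating buckets in position order with list-order ties is exactly a stable sort by find-position.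
import Mathlib
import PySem

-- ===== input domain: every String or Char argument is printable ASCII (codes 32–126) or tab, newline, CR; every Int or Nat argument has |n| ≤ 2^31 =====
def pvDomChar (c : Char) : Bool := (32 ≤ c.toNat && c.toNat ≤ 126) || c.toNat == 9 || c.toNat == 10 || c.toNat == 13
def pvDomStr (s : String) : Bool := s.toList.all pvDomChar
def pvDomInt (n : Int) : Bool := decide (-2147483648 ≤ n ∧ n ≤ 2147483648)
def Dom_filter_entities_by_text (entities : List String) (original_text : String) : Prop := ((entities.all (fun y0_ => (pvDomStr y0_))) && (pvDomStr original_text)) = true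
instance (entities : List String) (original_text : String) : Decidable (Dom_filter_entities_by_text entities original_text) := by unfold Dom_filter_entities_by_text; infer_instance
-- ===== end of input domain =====

-- B replaces A's comparison sort by a bucket (counting) sort over text positions
-- (objective: alternative algorithm, no sort call).

-- ===== PORT A =====
def filter_entities_by_text (entities : List String) (original_text : String) : List String :=
  -- `text = original_text or ""`: on strings this is original_text itself ("" when empty)
  let text := original_text
  let r := entities.foldl
    (fun (acc : List String × PySem.Set String) ent =>
      if acc.2.contains ent then acc                         -- `if ent in seen: continue`
      else if PySem.Str.isIn ent text then (acc.1 ++ [ent], acc.2.add ent)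
      else acc)
    ([], PySem.Set.empty)
  -- `kept.sort(key=lambda e: text.find(e))`
  PySem.List.sorted r.1 (fun e => PySem.Str.find text e)

-- ===== PORT B =====
def filter_entities_by_text_alt (entities : List String) (original_text : String) : List String :=
  let text := original_text
  -- `buckets = [[] for _ in range(len(text) + 1)]`
  let buckets0 : List (List String) := List.replicate (text.toList.length + 1) []
  let r := entities.foldl
    (fun (acc : List (List String) × PySem.Set String) ent =>
      if acc.2.contains ent then acc                         -- `if ent in seen: continue`
      else
        let p := PySem.Str.find text ent
        -- `buckets[p].append(ent)`: 0 ≤ p ≤ len(text) here, so List.set at p.toNat is exact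
        if 0 ≤ p then (acc.1.set p.toNat ((acc.1.getD p.toNat []) ++ [ent]), acc.2.add ent)
        else (acc.1, acc.2.add ent))
    (buckets0, PySem.Set.empty)
  -- `[e for b in buckets for e in b]`
  r.1.flatten

-- ===== PRECONDITION & SPEC =====
def Spec_filter_entities_by_text (entities : List String) (original_text : String) (out : List String) : Prop := out = filter_entities_by_text_alt entities original_text
instance (entities : List String) (original_text : String) (out : List String) : Decidable (Spec_filter_entities_by_text entities original_text out) := by unfold Spec_filter_entities_by_text; infer_instance

-- ===== CLAIM (what is proved, stated in full; the proofs are below) =====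
def Claim_equal_filter_entities_by_text : Prop := ∀ (entities : List String) (original_text : String), Dom_filter_entities_by_text entities original_text → Spec_filter_entities_by_text entities original_text (filter_entities_by_text entities original_text)

-- ===== LEMMAS AND PROOFS =====

-- the "keep if p and unseen, append at the end" step of A, on the kept list alone
def pvStep (p : String → Bool) (s : List String) (x : String) : List String :=
  if p x && !s.contains x then s ++ [x] else s

def pvSF (p : String → Bool) (acc : List String) (xs : List String) : List String :=
  xs.foldl (pvStep p) acc

-- the elements pvSF appends after acc
def pvDelta (p : String → Bool) : List String → List String → List String
  | _, [] => []
  | acc, x :: xs => if p x && !acc.contains x then x :: pvDelta p (acc ++ [x]) xs else pvDelta p acc xs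

-- B's dedup-everything-then-filter kept sequence (seen = all processed entities)
def pvKept (p : String → Bool) : List String → List String → List String
  | _, [] => []
  | s, x :: xs =>
    if s.contains x then pvKept p s xs
    else if p x then x :: pvKept p (s ++ [x]) xs
    else pvKept p (s ++ [x]) xs

-- B's bucket step on the buckets alone
def pvAppB (key : String → Int) (bkts : List (List String)) (x : String) : List (List String) :=
  bkts.set (key x).toNat ((bkts.getD (key x).toNat []) ++ [x])

-- bucket i of a list: its elements with key = i, in list order
def pvBkt (key : String → Int) (m : List String) (i : Nat) : List String :=
  m.filter (fun e => decide (key e = (i : Int)))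

def pvBuckets (key : String → Int) (N : Nat) (l : List String) : List (List String) :=
  (List.range (N + 1)).map (pvBkt key l)

theorem pvSF_nil (p : String → Bool) (acc : List String) : pvSF p acc [] = acc := rfl

theorem pvSF_cons (p : String → Bool) (acc : List String) (x : String) (xs : List String) :
    pvSF p acc (x :: xs) = pvSF p (pvStep p acc x) xs := rfl

theorem pvSF_eq_append_delta (p : String → Bool) (xs acc : List String) :
    pvSF p acc xs = acc ++ pvDelta p acc xs := by
  induction xs generalizing acc with
  | nil => simp [pvSF_nil, pvDelta]
  | cons x xs ih =>
    rw [pvSF_cons, pvDelta]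
    unfold pvStep
    by_cases h : (p x && !acc.contains x) = true
    · rw [if_pos h, if_pos h, ih (acc ++ [x])]
      simp
    · rw [if_neg h, if_neg h, ih acc]

theorem mem_pvSF (p : String → Bool) (x : String) (xs acc : List String) :
    x ∈ pvSF p acc xs ↔ x ∈ acc ∨ (p x = true ∧ x ∈ xs) := by
  induction xs generalizing acc with
  | nil => simp [pvSF_nil]
  | cons y ys ih =>
    rw [pvSF_cons, ih]
    unfold pvStep
    by_cases hxy : x = y
    · subst hxy
      by_cases h : (p x && !acc.contains x) = true
      · rw [if_pos h]
        simp_all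
      · rw [if_neg h]
        simp_all
        tauto
    · by_cases h : (p y && !acc.contains y) = true
      · rw [if_pos h]
        simp_all
      · rw [if_neg h]
        simp only [List.mem_cons]
        tauto

-- pvKept (seen = all processed) equals pvDelta (seen = kept so far) when the two seen
-- states agree on p-true elements
theorem pvKept_eq_delta (p : String → Bool) (xs : List String) :
    ∀ (s acc : List String), (∀ x, p x = true → (x ∈ s ↔ x ∈ acc)) →
    pvKept p s xs = pvDelta p acc xs := by
  induction xs with
  | nil => intro s acc _; rfl
  | cons x xs ih =>
    intro s acc hinv
    rw [pvKept, pvDelta]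
    by_cases hs : x ∈ s
    · rw [if_pos (by simpa using hs)]
      by_cases hp : p x = true
      · have hacc : x ∈ acc := (hinv x hp).mp hs
        rw [if_neg (by simp [hp, hacc])]
        exact ih s acc hinv
      · rw [if_neg (by simp at hp; simp [hp])]
        exact ih s acc hinv
    · rw [if_neg (by simpa using hs)]
      by_cases hp : p x = true
      · have hacc : x ∉ acc := fun h => hs ((hinv x hp).mpr h)
        rw [if_pos hp, if_pos (by simp [hp, hacc])]
        congr 1
        refine ih (s ++ [x]) (acc ++ [x]) ?_
        intro y hy
        by_cases hyx : y = x
        · subst hyx; simp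
        · simp only [List.mem_append, List.mem_singleton, hyx, or_false]
          exact hinv y hy
      · have hp' : p x = false := by simpa using hp
        rw [if_neg (by simp [hp']), if_neg (by simp [hp'])]
        refine ih (s ++ [x]) acc ?_
        intro y hy
        have hyx : y ≠ x := fun h => by subst h; rw [hy] at hp'; cases hp'
        simp only [List.mem_append, List.mem_singleton, hyx, or_false]
        exact hinv y hy

-- A's pair-state loop computes (pvSF, pvSF)
theorem pvFoldA (p : String → Bool) (xs : List String) (acc : List String) :
    xs.foldl
      (fun (acc : List String × PySem.Set String) ent =>
        if acc.2.contains ent then acc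
        else if p ent then (acc.1 ++ [ent], acc.2.add ent)
        else acc) (acc, acc)
      = (pvSF p acc xs, pvSF p acc xs) := by
  induction xs generalizing acc with
  | nil => rfl
  | cons x xs ih =>
    rw [List.foldl_cons, pvSF_cons]
    refine Eq.trans ?_ (ih (pvStep p acc x))
    congr 1
    unfold pvStep PySem.Set.add PySem.Set.contains
    by_cases hc : x ∈ acc <;> by_cases hp : p x = true <;> simp [hc, hp]

-- B's pair-state loop: buckets = fold of pvAppB over the pvKept sequence
theorem pvFoldB (key : String → Int) (xs : List String) :
    ∀ (bkts : List (List String)) (s : List String),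
    (xs.foldl
      (fun (acc : List (List String) × PySem.Set String) ent =>
        if acc.2.contains ent then acc
        else
          if 0 ≤ key ent then (acc.1.set (key ent).toNat ((acc.1.getD (key ent).toNat []) ++ [ent]), acc.2.add ent)
          else (acc.1, acc.2.add ent)) (bkts, s)).1
      = (pvKept (fun e => decide (0 ≤ key e)) s xs).foldl (pvAppB key) bkts := by
  induction xs with
  | nil => intro bkts s; rfl
  | cons x xs ih =>
    intro bkts s
    rw [List.foldl_cons, pvKept]
    by_cases hs : x ∈ s
    · have hc : PySem.Set.contains s x = true := by simp [PySem.Set.contains, hs]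
      have hc' : s.contains x = true := by simpa using hs
      rw [if_pos hc, if_pos hc']
      exact ih bkts s
    · have hc : ¬ (PySem.Set.contains s x = true) := by simp [PySem.Set.contains, hs]
      have hc' : ¬ (s.contains x = true) := by simpa using hs
      have hadd : PySem.Set.add s x = s ++ [x] := by simp [PySem.Set.add, hs]
      rw [if_neg hc, if_neg hc']
      by_cases hk : 0 ≤ key x
      · rw [if_pos hk, if_pos (by simpa using hk), List.foldl_cons]
        have := ih (pvAppB key bkts x) (s ++ [x])
        rw [hadd]
        exact this
      · rw [if_neg hk, if_neg (by simpa using hk)]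
        have := ih bkts (s ++ [x])
        rw [hadd]
        exact this

-- stable insertion: x goes after everything with key ≤ key x and before everything greater
theorem pvInsertBy_append (b : String → String → Bool) (x : String) (l1 l2 : List String)
    (h1 : ∀ a ∈ l1, b x a = false) (h2 : ∀ a ∈ l2, b x a = true) :
    PySem.List.insertBy b x (l1 ++ l2) = l1 ++ x :: l2 := by
  induction l1 with
  | nil =>
    cases l2 with
    | nil => rfl
    | cons h t =>
      show (if b x h then x :: h :: t else _) = _
      rw [if_pos (h2 h List.mem_cons_self)]
      rfl
  | cons a l1 ih =>
    show (if b x a then _ else a :: PySem.List.insertBy b x (l1 ++ l2)) = _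
    rw [if_neg (by simp [h1 a List.mem_cons_self]),
      ih (fun c hc => h1 c (List.mem_cons_of_mem _ hc))]
    rfl

theorem pvSorted_append_singleton (key : String → Int) (xs : List String) (x : String) :
    PySem.List.sorted (xs ++ [x]) key
      = PySem.List.insertBy (fun a b => decide (key a < key b)) x (PySem.List.sorted xs key) := by
  rw [PySem.List.sorted_eq_foldl_insertBy, PySem.List.sorted_eq_foldl_insertBy, List.foldl_append]
  rfl

theorem pvBkt_append_of_ne (key : String → Int) (m : List String) (x : String) (i : Nat)
    (h : key x ≠ (i : Int)) : pvBkt key (m ++ [x]) i = pvBkt key m i := by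
  simp [pvBkt, List.filter_append, h]

theorem pvBkt_append_self (key : String → Int) (m : List String) (x : String) (i : Nat)
    (h : key x = (i : Int)) : pvBkt key (m ++ [x]) i = pvBkt key m i ++ [x] := by
  simp [pvBkt, List.filter_append, h]

theorem length_pvBuckets (key : String → Int) (N : Nat) (l : List String) :
    (pvBuckets key N l).length = N + 1 := by simp [pvBuckets]

theorem pvBuckets_getElem (key : String → Int) (N : Nat) (l : List String) (i : Nat)
    (h : i < N + 1) :
    (pvBuckets key N l)[i]'(by rw [length_pvBuckets]; omega) = pvBkt key l i := by
  simp [pvBuckets]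

theorem pvBuckets_nil (key : String → Int) (N : Nat) :
    pvBuckets key N [] = List.replicate (N + 1) [] := by
  unfold pvBuckets
  rw [List.eq_replicate_iff]
  constructor
  · simp
  · intro b hb
    rcases List.mem_map.mp hb with ⟨i, _, h⟩
    simp [pvBkt, ← h]

theorem pvBuckets_getElem? (key : String → Int) (N : Nat) (l : List String) (i : Nat) :
    (pvBuckets key N l)[i]? = if i < N + 1 then some (pvBkt key l i) else none := by
  rw [pvBuckets, List.getElem?_map]
  by_cases h : i < N + 1
  · rw [if_pos h, List.getElem?_eq_getElem (by simpa using h)]; simp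
  · rw [if_neg h, List.getElem?_eq_none (by simpa using h)]; rfl

-- one bucket-append step = buckets of l ++ [x]
theorem pvAppB_buckets (key : String → Int) (N : Nat) (l : List String) (x : String)
    (h0 : 0 ≤ key x) (hN : key x ≤ (N : Int)) :
    pvAppB key (pvBuckets key N l) x = pvBuckets key N (l ++ [x]) := by
  have hkN : (key x).toNat < N + 1 := by omega
  have hcast : (((key x).toNat : Nat) : Int) = key x := Int.toNat_of_nonneg h0
  have hget : (pvBuckets key N l).getD (key x).toNat [] = pvBkt key l (key x).toNat := by
    rw [List.getD_eq_getElem?_getD, pvBuckets_getElem?, if_pos hkN]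
    rfl
  apply List.ext_getElem?
  intro i
  unfold pvAppB
  rw [hget, List.getElem?_set, length_pvBuckets, pvBuckets_getElem?, pvBuckets_getElem?]
  by_cases hik : (key x).toNat = i
  · subst hik
    rw [if_pos rfl, if_pos hkN, if_pos hkN, pvBkt_append_self key l x _ hcast.symm]
  · rw [if_neg hik]
    by_cases hiN : i < N + 1
    · rw [if_pos hiN, if_pos hiN,
        pvBkt_append_of_ne key l x i (fun hkey => hik (by omega))]
    · rw [if_neg hiN, if_neg hiN]

theorem pvFoldBuckets (key : String → Int) (N : Nat) (l : List String)
    (h : ∀ e ∈ l, 0 ≤ key e ∧ key e ≤ (N : Int)) :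
    l.foldl (pvAppB key) (List.replicate (N + 1) []) = pvBuckets key N l := by
  induction l using List.reverseRecOn with
  | nil => exact (pvBuckets_nil key N).symm
  | append_singleton l x ih =>
    rw [List.foldl_append, List.foldl_cons, List.foldl_nil,
      ih (fun e he => h e (List.mem_append_left _ he))]
    exact pvAppB_buckets key N l x (h x (by simp)).1 (h x (by simp)).2

-- the heart: concatenating the buckets in position order IS the stable sort by key
theorem pvFlattenBuckets_eq_sorted (key : String → Int) (N : Nat) (l : List String)
    (h : ∀ e ∈ l, 0 ≤ key e ∧ key e ≤ (N : Int)) :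
    (pvBuckets key N l).flatten = PySem.List.sorted l key := by
  induction l using List.reverseRecOn with
  | nil => rw [pvBuckets_nil]; simp; rfl
  | append_singleton l x ih =>
    have hmem : ∀ e ∈ l, 0 ≤ key e ∧ key e ≤ (N : Int) :=
      fun e he => h e (List.mem_append_left _ he)
    have hx := h x (by simp)
    set k := (key x).toNat with hk
    have hcast : ((k : Nat) : Int) = key x := Int.toNat_of_nonneg hx.1
    have hkN : k ≤ N := by omega
    rw [pvSorted_append_singleton, ← ih hmem]
    have hsplit : List.range (N + 1) = List.range (k + 1) ++ (List.range (N - k)).map (k + 1 + ·) := by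
      rw [show N + 1 = (k + 1) + (N - k) by omega, List.range_add]
    have hflat : ∀ (m : List String),
        (pvBuckets key N m).flatten
          = ((List.range k).map (pvBkt key m)).flatten ++ pvBkt key m k
            ++ (((List.range (N - k)).map (k + 1 + ·)).map (pvBkt key m)).flatten := by
      intro m
      rw [pvBuckets, hsplit, List.map_append, List.flatten_append, List.range_succ,
        List.map_append, List.flatten_append]
      simp
    have hlow : (List.range k).map (pvBkt key (l ++ [x]))
        = (List.range k).map (pvBkt key l) := by
      refine List.map_congr_left ?_
      intro i hi
      have hik : i < k := List.mem_range.mp hi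
      exact pvBkt_append_of_ne key l x i (by intro hkey; omega)
    have hhigh : ((List.range (N - k)).map (k + 1 + ·)).map (pvBkt key (l ++ [x]))
        = ((List.range (N - k)).map (k + 1 + ·)).map (pvBkt key l) := by
      refine List.map_congr_left ?_
      intro i hi
      rcases List.mem_map.mp hi with ⟨j, _, rfl⟩
      exact pvBkt_append_of_ne key l x _ (by intro hkey; omega)
    rw [hflat (l ++ [x]), hflat l, hlow, hhigh, pvBkt_append_self key l x k hcast.symm]
    set LOW := ((List.range k).map (pvBkt key l)).flatten with hLOW
    set BK := pvBkt key l k with hBK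
    set HIGH := (((List.range (N - k)).map (k + 1 + ·)).map (pvBkt key l)).flatten with hHIGH
    have hins : PySem.List.insertBy (fun a b => decide (key a < key b)) x
        ((LOW ++ BK) ++ HIGH) = (LOW ++ BK) ++ x :: HIGH := by
      apply pvInsertBy_append
      · intro a ha
        rcases List.mem_append.mp ha with ha | ha
        · rw [hLOW] at ha
          rcases List.mem_flatten.mp ha with ⟨bl, hbl, hab⟩
          rcases List.mem_map.mp hbl with ⟨i, hi, rfl⟩
          have hik : i < k := List.mem_range.mp hi
          have hkeya : key a = (i : Int) := by
            simpa [pvBkt] using (List.mem_filter.mp hab).2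
          simp only [decide_eq_false_iff_not, not_lt, hkeya]
          omega
        · have hkeya : key a = (k : Int) := by
            have h2 := (List.mem_filter.mp (hBK ▸ ha)).2
            simpa using h2
          simp only [decide_eq_false_iff_not, not_lt, hkeya]
          omega
      · intro a ha
        rw [hHIGH] at ha
        rcases List.mem_flatten.mp ha with ⟨bl, hbl, hab⟩
        rcases List.mem_map.mp hbl with ⟨i, hi, rfl⟩
        rcases List.mem_map.mp hi with ⟨j, _, rfl⟩
        have hkeya : key a = ((k + 1 + j : Nat) : Int) := by
          simpa [pvBkt] using (List.mem_filter.mp hab).2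
        simp only [decide_eq_true_eq, hkeya]
        push_cast
        omega
    calc LOW ++ (BK ++ [x]) ++ HIGH = (LOW ++ BK) ++ x :: HIGH := by simp
      _ = PySem.List.insertBy (fun a b => decide (key a < key b)) x ((LOW ++ BK) ++ HIGH) := hins.symm
      _ = PySem.List.insertBy (fun a b => decide (key a < key b)) x (LOW ++ BK ++ HIGH) := by rw [List.append_assoc]

-- ===== VERDICT (by name: the statement is the Claim_ definition above) =====
theorem filter_entities_by_text_spec : Claim_equal_filter_entities_by_text := by
  intro entities original_text _
  unfold Spec_filter_entities_by_text filter_entities_by_text filter_entities_by_text_alt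
  show PySem.List.sorted
      (entities.foldl
        (fun (acc : List String × PySem.Set String) ent =>
          if acc.2.contains ent then acc
          else if PySem.Str.isIn ent original_text then (acc.1 ++ [ent], acc.2.add ent)
          else acc) ([], [])).1 (fun e => PySem.Str.find original_text e)
    = ((entities.foldl
        (fun (acc : List (List String) × PySem.Set String) ent =>
          if acc.2.contains ent then acc
          else
            if 0 ≤ PySem.Str.find original_text ent then
              (acc.1.set (PySem.Str.find original_text ent).toNat
                ((acc.1.getD (PySem.Str.find original_text ent).toNat []) ++ [ent]), acc.2.add ent)
            else (acc.1, acc.2.add ent))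
        (List.replicate (original_text.toList.length + 1) [], [])).1).flatten
  rw [pvFoldA (fun ent => PySem.Str.isIn ent original_text) entities [],
    pvFoldB (fun e => PySem.Str.find original_text e) entities
      (List.replicate (original_text.toList.length + 1) []) []]
  have hp : (fun ent => PySem.Str.isIn ent original_text)
      = (fun e => decide (0 ≤ PySem.Str.find original_text e)) := by
    funext e
    by_cases h : e.toList <:+: original_text.toList
    · rw [(PySem.Str.isIn_iff_infix e original_text).mpr h, decide_eq_true ((PySem.Str.find_nonneg_iff original_text e).mpr h)]
    · have h1 : PySem.Str.isIn e original_text = false := by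
        rw [← Bool.not_eq_true, PySem.Str.isIn_iff_infix e original_text]
        exact h
      have h2 : ¬ (0 ≤ PySem.Str.find original_text e) :=
        fun hc => h ((PySem.Str.find_nonneg_iff original_text e).mp hc)
      rw [h1, decide_eq_false h2]
  have hkept2 : pvKept (fun e => decide (0 ≤ PySem.Str.find original_text e)) [] entities
      = pvSF (fun e => decide (0 ≤ PySem.Str.find original_text e)) [] entities := by
    rw [pvSF_eq_append_delta, List.nil_append]
    exact pvKept_eq_delta _ entities [] [] (fun x _ => Iff.rfl)
  have hkept : pvSF (fun ent => PySem.Str.isIn ent original_text) [] entities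
      = pvKept (fun e => decide (0 ≤ PySem.Str.find original_text e)) [] entities := by
    rw [hp, hkept2]
  rw [hkept]
  have hbound : ∀ e ∈ pvKept (fun e => decide (0 ≤ PySem.Str.find original_text e)) [] entities,
      0 ≤ PySem.Str.find original_text e
        ∧ PySem.Str.find original_text e ≤ (original_text.toList.length : Int) := by
    intro e he
    rw [hkept2] at he
    have hpe := ((mem_pvSF _ e entities []).mp he).resolve_left (by simp)
    refine ⟨by simpa using hpe.1, ?_⟩
    have := PySem.Chars.find_le_length original_text.toList e.toList
    simpa [PySem.Str.find_eq] using this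
  rw [pvFoldBuckets _ _ _ hbound, pvFlattenBuckets_eq_sorted _ _ _ hbound]
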